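-- pv_equiv track=rewrite | github.com/masthom/Music-History-Knowledge-Graph | check_rotations.py | rotation_shift
-- ===== SOURCE A (Python) =====
-- def rotation_shift(a, b):
--     """If b is rotation of a, return shift k such that b == a[k:]+a[:k], else None."""
--     if len(a) != len(b):
--         return None
--     doubled = a + a
--     L = len(a)
--     for k in range(L):
--         if doubled[k:k+L] == b:
--             return k
--     return None
-- ===== SOURCE B (Python) =====
-- def rotation_shift(a, b):
--     """If b is rotation of a, return shift k such that b == a[k:]+a[:k], else None."""
--     L = len(a)
--     if L != len(b):
--         return None
--     # candidate-elimination sieve: scan positions j, keep only shifts consistent so far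
--     cands = list(range(L))
--     for j in range(L):
--         x = b[j]
--         cands = [k for k in cands if a[(k + j) % L] == x]
--     return cands[0] if cands else None
-- ===== Notes on version B (the rewrite author's own statement) =====
-- stated objective: faster
-- what changed: Replaces A's per-shift window comparison (slice a+a and compare a full length-n window for each k) with a candidate-elimination sieve: one scan over positions j=0..n-1 filters the set of surviving shifts by b[j], returning the smallest survivor; almost all shifts die within the first few positions on typical inputs.
import Mathlib
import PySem

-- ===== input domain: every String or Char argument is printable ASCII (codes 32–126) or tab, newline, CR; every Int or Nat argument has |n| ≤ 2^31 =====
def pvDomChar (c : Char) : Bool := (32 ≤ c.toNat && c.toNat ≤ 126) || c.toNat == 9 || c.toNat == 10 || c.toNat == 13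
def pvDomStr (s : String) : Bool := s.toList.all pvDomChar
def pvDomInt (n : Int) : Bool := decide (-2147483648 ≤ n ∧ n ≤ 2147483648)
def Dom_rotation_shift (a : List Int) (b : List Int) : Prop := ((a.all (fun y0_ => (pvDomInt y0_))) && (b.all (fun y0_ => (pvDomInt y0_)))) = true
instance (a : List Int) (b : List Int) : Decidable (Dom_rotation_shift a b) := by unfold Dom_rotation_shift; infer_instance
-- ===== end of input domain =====

-- B replaces A's per-shift full-window comparison with a per-position candidate-elimination sieve over the surviving shifts (measured much faster on the generated inputs; same worst case).


-- ===== PORT A =====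
def rotation_shift (a : List Int) (b : List Int) : Option Int :=
  if a.length ≠ b.length then none
  else
    let doubled := a ++ a
    let L := a.length
    ((List.range L).find? (fun k =>
      PySem.List.slice doubled (some ((k : Nat) : Int)) (some (((k + L : Nat)) : Int)) == b)).map
      (fun k => (k : Int))

-- ===== PORT B =====
def rotation_shift_alt (a : List Int) (b : List Int) : Option Int :=
  let L := a.length
  if L ≠ b.length then none
  else
    let cands := (List.range L).foldl (fun cs j =>
      let x := b.getD j 0
      cs.filter (fun k => a.getD ((k + j) % L) 0 == x)) (List.range L)
    cands.head?.map (fun k => (k : Int))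

-- ===== PRECONDITION & SPEC =====
def Spec_rotation_shift (a : List Int) (b : List Int) (out : Option Int) : Prop := out = rotation_shift_alt a b
instance (a : List Int) (b : List Int) (out : Option Int) : Decidable (Spec_rotation_shift a b out) := by unfold Spec_rotation_shift; infer_instance

-- ===== CLAIM (what is proved, stated in full; the proofs are below) =====
def Claim_equal_rotation_shift : Prop := ∀ (a : List Int) (b : List Int), Dom_rotation_shift a b → Spec_rotation_shift a b (rotation_shift a b)

-- ===== LEMMAS AND PROOFS =====

-- a fold of filters is one filter by the conjunction of the predicates
theorem foldl_filter_range {α : Type} (p : Nat → α → Bool) (cs : List α) (n : Nat) :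
    (List.range n).foldl (fun cs j => cs.filter (p j)) cs
      = cs.filter (fun k => decide (∀ j < n, p j k = true)) := by
  induction n with
  | zero => simp
  | succ n ih =>
    rw [List.range_succ, List.foldl_append, ih]
    simp only [List.foldl_cons, List.foldl_nil, List.filter_filter]
    apply List.filter_congr
    intro k _
    rw [Bool.eq_iff_iff]
    simp only [Bool.and_eq_true, decide_eq_true_eq]
    constructor
    · rintro ⟨h1, h2⟩ j hj
      rcases Nat.lt_succ_iff_lt_or_eq.mp hj with h' | rfl
      · first | exact h1 j h' | exact h2 j h'
      · exact h1
    · intro h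
      refine ⟨?_, ?_⟩ <;>
        first
          | exact fun j hj => h j (Nat.lt_succ_of_lt hj)
          | exact h n (Nat.lt_succ_self n)

theorem head?_filter_eq_find? {α : Type} (p : α → Bool) (l : List α) :
    (l.filter p).head? = l.find? p := by
  induction l with
  | nil => rfl
  | cons x xs ih =>
    by_cases h : p x = true
    · simp [h]
    · simp only [Bool.not_eq_true] at h
      simp [h, ih]

theorem find?_congr' {α : Type} (p q : α → Bool) (l : List α)
    (h : ∀ x ∈ l, p x = q x) : l.find? p = l.find? q := by
  induction l with
  | nil => rfl
  | cons x xs ih =>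
    rw [List.find?_cons, List.find?_cons, h x List.mem_cons_self,
      ih (fun y hy => h y (List.mem_cons_of_mem x hy))]

-- pointwise: for a shift k < length, A's full-window comparison equals B's
-- "consistent at every position" condition
theorem window_eq_pointwise (a b : List Int) (k : Nat)
    (hb : b.length = a.length) (hk : k < a.length) :
    (PySem.List.slice (a ++ a) (some ((k : Nat) : Int)) (some (((k + a.length : Nat)) : Int)) == b)
      = decide (∀ j < a.length, (a.getD ((k + j) % a.length) 0 == b.getD j 0) = true) := by
  rw [PySem.List.slice_natCast]
  have htl : (((a ++ a).drop k).take (k + a.length - k)).length = a.length := by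
    simp [List.length_take, List.length_drop]; omega
  have hget : ∀ j (hj : j < a.length), (a ++ a)[k + j]'(by simp only [List.length_append]; omega) = a.getD ((k + j) % a.length) 0 := by
    intro j hj
    rcases Nat.lt_or_ge (k + j) a.length with h' | h'
    · rw [List.getElem_append_left (by omega)]
      simp [List.getD, List.getElem?_eq_getElem (by omega : k + j < a.length),
        Nat.mod_eq_of_lt (by omega : k + j < a.length)]
    · rw [List.getElem_append_right (by omega)]
      have hm : (k + j) % a.length = k + j - a.length := by
        rw [Nat.mod_eq_sub_mod (by omega), Nat.mod_eq_of_lt (by omega)]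
      simp [List.getD, hm,
        List.getElem?_eq_getElem (by omega : k + j - a.length < a.length)]
  rw [Bool.eq_iff_iff]
  simp only [beq_iff_eq, decide_eq_true_eq]
  constructor
  · intro heq j hj
    have hth := congrArg (fun l => l.getD j 0) heq
    simp only [List.getD] at hth ⊢
    rw [List.getElem?_take, List.getElem?_drop] at hth
    rw [if_pos (by omega : j < k + a.length - k)] at hth
    rw [List.getElem?_eq_getElem (by simp; omega : k + j < (a ++ a).length)] at hth
    rw [hget j hj] at hth
    simp only [List.getD] at hth
    exact hth
  · intro h
    apply List.ext_getElem
    · rw [htl, hb]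
    · intro j hj hj'
      have hjL : j < a.length := htl ▸ hj
      rw [List.getElem_take, List.getElem_drop, hget j hjL]
      have h' := h j hjL
      simp only [List.getD] at h' ⊢
      rw [List.getElem?_eq_getElem (by omega : j < b.length)] at h'
      exact h'

-- ===== VERDICT (by name: the statement is the Claim_ definition above) =====
theorem rotation_shift_spec : Claim_equal_rotation_shift := by
  intro a b _
  unfold Spec_rotation_shift rotation_shift rotation_shift_alt
  by_cases hlen : a.length = b.length
  · simp only [ne_eq, hlen, not_true_eq_false, if_false]
    rw [foldl_filter_range, head?_filter_eq_find?]
    have h : ∀ k ∈ List.range b.length,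
        (PySem.List.slice (a ++ a) (some ((k : Nat) : Int)) (some (((k + b.length : Nat)) : Int)) == b)
          = decide (∀ j < b.length, (a.getD ((k + j) % b.length) 0 == b.getD j 0) = true) := by
      intro k hk
      rw [List.mem_range] at hk
      have hw := window_eq_pointwise a b k hlen.symm (by rw [hlen]; exact hk)
      rw [hlen] at hw
      exact hw
    rw [find?_congr'
      (fun k => PySem.List.slice (a ++ a) (some ((k : Nat) : Int)) (some (((k + b.length : Nat)) : Int)) == b)
      (fun k => decide (∀ j < b.length, (a.getD ((k + j) % b.length) 0 == b.getD j 0) = true))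
      (List.range b.length) h]
  · simp [hlen]
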